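-- pv_equiv track=rewrite | github.com/benhancock/ci-splitter | src/ci_splitter/generate_workflow.py | distribute_tests
-- ===== SOURCE A (Python) =====
-- def distribute_tests(test_files, num_jobs):
--     if not test_files:
--         return [[] for _ in range(num_jobs)]
--
--     sorted_tests = sorted(test_files)
--     job_tests = [[] for _ in range(num_jobs)]
--
--     for i, test_file in enumerate(sorted_tests):
--         job_tests[i % num_jobs].append(test_file)
--
--     return job_tests
-- ===== SOURCE B (Python) =====
-- def distribute_tests(test_files, num_jobs):
--     sorted_tests = sorted(test_files)
--     return [[sorted_tests[i] for i in range(j, len(sorted_tests), num_jobs)]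
--             for j in range(num_jobs)]
-- ===== Notes on version B (the rewrite author's own statement) =====
-- stated objective: simpler
-- what changed: B inverts the iteration space: instead of A's scatter loop that mutates per-job buckets by i % num_jobs, B gathers each job's bucket directly as the strided index range j, j+num_jobs, ... over the sorted list (and the empty-input guard disappears).
import Mathlib
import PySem

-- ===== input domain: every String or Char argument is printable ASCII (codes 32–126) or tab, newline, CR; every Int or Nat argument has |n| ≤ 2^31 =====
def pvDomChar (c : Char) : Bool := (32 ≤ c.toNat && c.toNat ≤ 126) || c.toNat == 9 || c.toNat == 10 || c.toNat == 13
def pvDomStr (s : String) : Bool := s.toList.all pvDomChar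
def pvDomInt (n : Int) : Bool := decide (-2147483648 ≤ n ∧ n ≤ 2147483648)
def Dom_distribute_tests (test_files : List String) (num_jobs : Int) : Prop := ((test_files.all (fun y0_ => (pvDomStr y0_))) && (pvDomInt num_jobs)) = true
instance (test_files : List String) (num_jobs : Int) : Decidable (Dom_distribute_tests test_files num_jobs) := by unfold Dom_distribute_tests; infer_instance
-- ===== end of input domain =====

-- B gathers each job's bucket by a strided index range over the sorted list instead of
-- A's scatter loop that mutates per-job buckets; objective: simpler.


-- ===== PORT A =====
-- job_tests[r].append(x): append x to the r-th bucket (r is always in range under Pre_)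
def pvAppendAt : List (List String) → Nat → String → List (List String)
  | [], _, _ => []
  | b :: bs, 0, x => (b ++ [x]) :: bs
  | b :: bs, k+1, x => b :: pvAppendAt bs k x

def distribute_tests (test_files : List String) (num_jobs : Int) : List (List String) :=
  if test_files = [] then
    (PySem.List.pyRange 0 num_jobs 1).map (fun _ => ([] : List String))
  else
    let sorted_tests := PySem.List.sorted test_files (fun x => x)
    let job_tests := (PySem.List.pyRange 0 num_jobs 1).map (fun _ => ([] : List String))
    (PySem.List.enumerate sorted_tests).foldl
      (fun acc p => pvAppendAt acc (PySem.Int.mod p.1 num_jobs).toNat p.2) job_tests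

-- ===== PORT B =====
-- inner indexing sorted_tests[i] is always in range (0 ≤ j ≤ i < len, step num_jobs ≥ 1), so pyGetD's default is never used
def distribute_tests_alt (test_files : List String) (num_jobs : Int) : List (List String) :=
  let sorted_tests := PySem.List.sorted test_files (fun x => x)
  (PySem.List.pyRange 0 num_jobs 1).map (fun j =>
    (PySem.List.pyRange j (sorted_tests.length : Int) num_jobs).map
      (fun i => PySem.List.pyGetD sorted_tests i ""))

-- ===== PRECONDITION & SPEC =====
-- Pre_ excludes exactly the inputs where A raises: non-empty test_files with num_jobs ≤ 0
-- (ZeroDivisionError at num_jobs = 0, IndexError at num_jobs < 0).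
def Pre_distribute_tests (test_files : List String) (num_jobs : Int) : Prop :=
  test_files = [] ∨ 1 ≤ num_jobs
instance (test_files : List String) (num_jobs : Int) : Decidable (Pre_distribute_tests test_files num_jobs) := by unfold Pre_distribute_tests; infer_instance

def pvWitness_distribute_tests : List String × Int := (["b", "a", "c"], 2)

def Spec_distribute_tests (test_files : List String) (num_jobs : Int) (out : List (List String)) : Prop := out = distribute_tests_alt test_files num_jobs
instance (test_files : List String) (num_jobs : Int) (out : List (List String)) : Decidable (Spec_distribute_tests test_files num_jobs out) := by unfold Spec_distribute_tests; infer_instance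

-- ===== CLAIM (what is proved, stated in full; the proofs are below) =====
def Claim_equal_distribute_tests : Prop := ∀ (test_files : List String) (num_jobs : Int), Dom_distribute_tests test_files num_jobs → Pre_distribute_tests test_files num_jobs → Spec_distribute_tests test_files num_jobs (distribute_tests test_files num_jobs)

-- ===== LEMMAS AND PROOFS =====

-- every N-th element, starting at the head
def everyNth (N : Nat) : List String → List String
  | [] => []
  | x :: t => x :: everyNth N (t.drop (N-1))
  termination_by l => l.length
  decreasing_by simp

lemma everyNth_nil (N : Nat) : everyNth N [] = [] := by rw [everyNth.eq_def]

lemma everyNth_cons (N : Nat) (x : String) (t : List String) :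
    everyNth N (x :: t) = x :: everyNth N (t.drop (N-1)) := by rw [everyNth.eq_def]

lemma pvAppendAt_length (acc : List (List String)) (r : Nat) (x : String) :
    (pvAppendAt acc r x).length = acc.length := by
  induction acc generalizing r with
  | nil => simp [pvAppendAt]
  | cons b bs ih =>
      cases r with
      | zero => simp [pvAppendAt]
      | succ k => simp [pvAppendAt, ih]

lemma pvAppendAt_getElem (acc : List (List String)) (r j : Nat) (x : String)
    (hj : j < acc.length) :
    (pvAppendAt acc r x)[j]'(by rw [pvAppendAt_length]; exact hj)
      = if j = r then acc[j] ++ [x] else acc[j] := by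
  induction acc generalizing r j with
  | nil => simp at hj
  | cons b bs ih =>
      cases r with
      | zero =>
          cases j with
          | zero => simp [pvAppendAt]
          | succ m => simp [pvAppendAt]
      | succ k =>
          cases j with
          | zero => simp [pvAppendAt]
          | succ m =>
              simp only [pvAppendAt, List.getElem_cons_succ]
              rw [ih]
              · simp
              · simpa using hj

-- pyRange with step 1 from 0
lemma pyRange_one_zero (n : Int) :
    PySem.List.pyRange 0 n 1 = (List.range n.toNat).map (fun (k : Nat) => (k : Int)) := by
  simp only [PySem.List.pyRange, if_neg (by norm_num : ¬ (1:Int) = 0),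
    if_pos (by norm_num : (0:Int) < 1)]
  by_cases h : (0:Int) < n
  · rw [if_pos h]
    have h1 : (n - 0 + 1 - 1) / 1 = n := by omega
    rw [h1]
    apply List.map_congr_left
    intro k _
    ring
  · rw [if_neg h]
    have h1 : n.toNat = 0 := by omega
    simp [h1]

lemma map_pyRange_one {α : Type} (f : Int → α) (n : Int) :
    (PySem.List.pyRange 0 n 1).map f = (List.range n.toNat).map (fun (k : Nat) => f (k : Int)) := by
  rw [pyRange_one_zero, List.map_map]
  rfl

lemma pyRange_pos_nil (a b s : Int) (hs : 0 < s) (hab : b ≤ a) :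
    PySem.List.pyRange a b s = [] := by
  have hs' : ¬ s = 0 := by omega
  simp [PySem.List.pyRange, hs', hs]
  intro h; omega

lemma pyRange_pos_cons (a b s : Int) (hs : 0 < s) (hab : a < b) :
    PySem.List.pyRange a b s = a :: PySem.List.pyRange (a + s) b s := by
  have hs' : ¬ s = 0 := by omega
  simp only [PySem.List.pyRange, if_neg hs', if_pos hs, if_pos hab]
  by_cases h2 : a + s < b
  · rw [if_pos h2]
    have key : (b - a + s - 1) / s = (b - (a + s) + s - 1) / s + 1 := by
      have : b - a + s - 1 = (b - (a + s) + s - 1) + 1 * s := by ring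
      rw [this, Int.add_mul_ediv_right _ _ hs']
    have hnn : 0 ≤ (b - (a + s) + s - 1) / s := by
      apply Int.ediv_nonneg <;> omega
    rw [key]
    have htn : ((b - (a + s) + s - 1) / s + 1).toNat = ((b - (a + s) + s - 1) / s).toNat + 1 := by
      omega
    rw [htn, List.range_succ_eq_map]
    simp only [List.map_cons, List.map_map]
    congr 1
    · push_cast; ring
    · apply List.map_congr_left
      intro k _
      simp only [Function.comp_apply]
      push_cast
      ring
  · rw [if_neg h2]
    have h1 : (b - a + s - 1) / s = 1 := by
      have heq : b - a + s - 1 = (b - a - 1) + 1 * s := by ring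
      rw [heq, Int.add_mul_ediv_right _ _ hs']
      have : (b - a - 1) / s = 0 := by
        apply Int.ediv_eq_zero_of_lt <;> omega
      omega
    rw [h1]
    simp

-- B's bucket j is everyNth N of the sorted list dropped by j
lemma bucket_eq_everyNth (N : Nat) (hN : 0 < N) (ys : List String) (j : Nat) :
    (PySem.List.pyRange (j : Int) (ys.length : Int) (N : Int)).map
      (fun i => PySem.List.pyGetD ys i "")
    = everyNth N (ys.drop j) := by
  by_cases hj : j < ys.length
  · rw [pyRange_pos_cons _ _ _ (by exact_mod_cast hN) (by exact_mod_cast hj)]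
    have hdrop : ys.drop j = ys[j] :: ys.drop (j + 1) := List.drop_eq_getElem_cons hj
    rw [hdrop, everyNth_cons]
    simp only [List.map_cons]
    congr 1
    · rw [PySem.List.pyGetD_natCast]
      simp [List.getD, List.getElem?_eq_getElem hj]
    · have hc : ((j : Int) + (N : Int)) = ((j + N : Nat) : Int) := by push_cast; ring
      rw [hc, bucket_eq_everyNth N hN ys (j + N)]
      rw [List.drop_drop]
      congr 1
      congr 1
      omega
  · rw [pyRange_pos_nil _ _ _ (by exact_mod_cast hN) (by exact_mod_cast (by omega : ys.length ≤ j))]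
    rw [List.drop_eq_nil_of_le (by omega), everyNth_nil]
    simp
termination_by ys.length - j
decreasing_by omega

-- the first position p in the remaining list whose overall index is ≡ j (mod N),
-- when the next overall index has residue r
def dshift (N j r : Nat) : Nat := if r ≤ j then j - r else j + N - r

lemma map_getElem_range (acc : List (List String)) :
    (List.range acc.length).map (fun j => acc[j]!) = acc := by
  apply List.ext_getElem
  · simp
  · intro i h1 h2
    simp only [List.getElem_map, List.getElem_range]
    rw [List.getElem!_eq_getElem?_getD, List.getElem?_eq_getElem h2]
    simp

-- A's scatter fold, characterised
lemma scatter_core (N : Nat) (hN : 0 < N) :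
    ∀ (xs : List String) (k : Nat) (acc : List (List String)), acc.length = N →
      List.foldl (fun a (p : Int × String) => pvAppendAt a (PySem.Int.mod p.1 (N : Int)).toNat p.2)
        acc (PySem.List.enumerate xs (k : Int))
      = (List.range N).map (fun j => acc[j]! ++ everyNth N (xs.drop (dshift N j (k % N)))) := by
  intro xs
  induction xs with
  | nil =>
      intro k acc hacc
      simp only [PySem.List.enumerate, List.foldl_nil]
      have h := map_getElem_range acc
      rw [hacc] at h
      conv_lhs => rw [← h]
      apply List.map_congr_left
      intro j _
      simp [everyNth_nil]
  | cons x t ih =>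
      intro k acc hacc
      have hmod : (PySem.Int.mod (k : Int) (N : Int)).toNat = k % N := by
        unfold PySem.Int.mod
        rw [Int.fmod_eq_emod, if_pos (Or.inl (by positivity))]
        omega
      simp only [PySem.List.enumerate, List.foldl_cons]
      have hk1 : ((k : Int) + 1) = ((k + 1 : Nat) : Int) := by push_cast; ring
      rw [hmod, hk1, ih (k + 1) (pvAppendAt acc (k % N) x) (by rw [pvAppendAt_length]; exact hacc)]
      apply List.map_congr_left
      intro j hj
      have hjN : j < N := List.mem_range.mp hj
      have hjacc : j < acc.length := by omega
      have hget : (pvAppendAt acc (k % N) x)[j]!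
          = if j = k % N then acc[j]! ++ [x] else acc[j]! := by
        have h1 : (pvAppendAt acc (k % N) x)[j]!
            = (pvAppendAt acc (k % N) x)[j]'(by rw [pvAppendAt_length]; exact hjacc) := by
          rw [List.getElem!_eq_getElem?_getD,
            List.getElem?_eq_getElem (by rw [pvAppendAt_length]; exact hjacc)]
          simp
        have h2 : acc[j]! = acc[j] := by
          rw [List.getElem!_eq_getElem?_getD, List.getElem?_eq_getElem hjacc]
          simp
        rw [h1, pvAppendAt_getElem acc (k % N) j x hjacc, h2]
      rw [hget]
      have hrlt : k % N < N := Nat.mod_lt _ hN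
      have hstep : ((k + 1) % N = k % N + 1 ∧ k % N + 1 < N) ∨
          ((k + 1) % N = 0 ∧ k % N + 1 = N) := by
        by_cases hkn : k % N + 1 = N
        · refine Or.inr ⟨?_, hkn⟩
          rw [← Nat.mod_add_mod, hkn, Nat.mod_self]
        · have hlt : k % N + 1 < N := by omega
          refine Or.inl ⟨?_, hlt⟩
          rw [← Nat.mod_add_mod, Nat.mod_eq_of_lt hlt]
      by_cases hcase : j = k % N
      · rw [if_pos hcase]
        have hd0 : dshift N j (k % N) = 0 := by unfold dshift; split_ifs <;> omega
        have hd1 : dshift N j ((k + 1) % N) = N - 1 := by unfold dshift; split_ifs <;> omega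
        rw [hd0, hd1, List.drop_zero, everyNth_cons]
        simp
      · rw [if_neg hcase]
        have hd : dshift N j (k % N) = dshift N j ((k + 1) % N) + 1 := by
          unfold dshift; split_ifs <;> omega
        rw [hd, List.drop_succ_cons]

lemma sorted_nil : PySem.List.sorted ([] : List String) (fun x => x) = [] := by decide

lemma dshift_zero (N j : Nat) : dshift N j 0 = j := by unfold dshift; simp

-- ===== VERDICT (by name: the statement is the Claim_ definition above) =====
theorem distribute_tests_spec : Claim_equal_distribute_tests := by
  intro tf n _ hpre
  unfold Spec_distribute_tests distribute_tests distribute_tests_alt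
  by_cases htf : tf = []
  · subst htf
    rw [if_pos rfl, sorted_nil]
    simp only [List.length_nil, Nat.cast_zero]
    rw [map_pyRange_one, map_pyRange_one]
    apply List.map_congr_left
    intro k hk
    have hk' := List.mem_range.mp hk
    have hn0 : 0 < n := by omega
    rw [pyRange_pos_nil _ _ _ hn0 (by positivity)]
    simp
  · have hn : 1 ≤ n := hpre.resolve_left htf
    rw [if_neg htf]
    set ys := PySem.List.sorted tf (fun x => x) with hys
    set N := n.toNat with hN
    have hNpos : 0 < N := by omega
    have hcast : (N : Int) = n := by omega
    have hinit : (PySem.List.pyRange 0 n 1).map (fun _ => ([] : List String))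
        = List.replicate N [] := by
      rw [map_pyRange_one]
      simp [hN]
    rw [hinit]
    have hA := scatter_core N hNpos ys 0 (List.replicate N []) (by simp)
    rw [hcast] at hA
    simp only [Nat.cast_zero] at hA
    rw [hA]
    rw [map_pyRange_one, ← hN]
    apply List.map_congr_left
    intro j hj
    have hjN : j < N := List.mem_range.mp hj
    have hrep : (List.replicate N ([] : List String))[j]! = [] := by
      rw [List.getElem!_eq_getElem?_getD, List.getElem?_eq_getElem (by simpa using hjN)]
      simp
    rw [hrep]
    have hb := bucket_eq_everyNth N hNpos ys j
    rw [hcast] at hb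
    rw [hb, Nat.zero_mod, dshift_zero]
    simp
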